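-- pv_equiv track=rewrite | github.com/ishaheen10/psxgptinfrav3 | pipeline/stage3_extract/Step6_DeriveQuarters.py | derive_quarter_values
-- ===== SOURCE A (Python) =====
-- def derive_quarter_values(base_values: dict, subtract_values: list[dict]) -> dict:
--     """Derive quarter values by subtracting multiple periods from base."""
--     result = {}
--     for key, base_val in base_values.items():
--         if base_val is None:
--             result[key] = None
--             continue
--
--         derived = base_val
--         for sub_vals in subtract_values:
--             sub_val = sub_vals.get(key)
--             if sub_val is not None:
--                 derived -= sub_val
--             # If any subtraction value is None, we can't derive
--             elif key in sub_vals: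
--                 derived = None
--                 break
--         result[key] = derived
--     return result
-- ===== SOURCE B (Python) =====
-- def derive_quarter_values(base_values: dict, subtract_values: list[dict]) -> dict:
--     """Derive quarter values by subtracting multiple periods from base."""
--     result = dict(base_values)
--     dead = {key for key, val in base_values.items() if val is None}
--     for sub_vals in subtract_values:
--         for key in base_values:
--             if key in dead:
--                 continue
--             sub_val = sub_vals.get(key)
--             if sub_val is not None:
--                 result[key] -= sub_val
--             elif key in sub_vals:
--                 result[key] = None
--                 dead.add(key)
--     return result
-- ===== Notes on version B (the rewrite author's own statement) =====
-- stated objective: alternative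
-- what changed: Transposes the nested loops (outer over subtract dicts, inner over base keys) and replaces the per-key break with a copied result dict plus an explicit dead-key set that short-circuits finished keys.
import Mathlib
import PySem

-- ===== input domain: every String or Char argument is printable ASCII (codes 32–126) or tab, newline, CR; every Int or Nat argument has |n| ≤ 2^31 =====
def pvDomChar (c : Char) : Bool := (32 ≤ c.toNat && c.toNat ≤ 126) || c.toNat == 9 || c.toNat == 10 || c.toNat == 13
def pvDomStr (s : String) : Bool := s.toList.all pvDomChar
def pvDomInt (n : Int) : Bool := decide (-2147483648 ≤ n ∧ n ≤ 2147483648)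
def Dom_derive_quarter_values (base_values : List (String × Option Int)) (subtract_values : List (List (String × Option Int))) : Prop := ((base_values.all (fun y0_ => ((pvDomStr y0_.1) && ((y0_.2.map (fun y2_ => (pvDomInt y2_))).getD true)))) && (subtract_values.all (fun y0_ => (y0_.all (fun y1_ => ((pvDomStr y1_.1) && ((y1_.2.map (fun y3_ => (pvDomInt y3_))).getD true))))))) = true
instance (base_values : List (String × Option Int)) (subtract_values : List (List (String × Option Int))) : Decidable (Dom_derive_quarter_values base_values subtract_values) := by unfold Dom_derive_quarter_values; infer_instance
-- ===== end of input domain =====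

-- B transposes the nested loops (outer over subtract dicts, inner over base keys) and
-- maintains a result dict plus an explicit dead-key set instead of a per-key break;
-- same cost, alternative decomposition.

-- ===== PORT A =====
-- inner 'for sub_vals in subtract_values' loop of A, with the 'break' as early return
def pvLoopA (key : String) (derived : Int) : List (PySem.Dict String (Option Int)) → Option Int
  | [] => some derived
  | sub_vals :: rest =>
    match sub_vals.get? key with
    | some (some s) => pvLoopA key (derived - s) rest
    | some none => none
    | none => pvLoopA key derived rest

def derive_quarter_values (base_values : List (String × Option Int)) (subtract_values : List (List (String × Option Int))) : List (String × Option Int) :=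
  let base := PySem.Dict.ofList base_values
  let subs := subtract_values.map PySem.Dict.ofList
  (base.items.foldl (fun result kv =>
      match kv.2 with
      | none => result.insert kv.1 none
      | some b => result.insert kv.1 (pvLoopA kv.1 b subs)) PySem.Dict.empty).items

-- ===== PORT B =====
-- body of B's inner 'for key in base_values' loop
def pvInnerStep (sub_vals : PySem.Dict String (Option Int))
    (st : PySem.Dict String (Option Int) × PySem.Set String) (key : String) :
    PySem.Dict String (Option Int) × PySem.Set String :=
  if PySem.Set.contains st.2 key then st
  else
    match sub_vals.get? key with
    | some (some s) => (st.1.insert key ((st.1.getD key none).map (· - s)), st.2)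
    | some none => (st.1.insert key none, PySem.Set.add st.2 key)
    | none => st

def derive_quarter_values_alt (base_values : List (String × Option Int)) (subtract_values : List (List (String × Option Int))) : List (String × Option Int) :=
  let base := PySem.Dict.ofList base_values
  let dead0 : PySem.Set String :=
    PySem.Set.ofList (base.items.filterMap (fun kv => if kv.2 = none then some kv.1 else none))
  let st := subtract_values.foldl
      (fun st sub_vals => base.keys.foldl (pvInnerStep (PySem.Dict.ofList sub_vals)) st)
      (base, dead0)
  st.1.items

-- ===== PRECONDITION & SPEC =====
def Spec_derive_quarter_values (base_values : List (String × Option Int)) (subtract_values : List (List (String × Option Int))) (out : List (String × Option Int)) : Prop := out = derive_quarter_values_alt base_values subtract_values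
instance (base_values : List (String × Option Int)) (subtract_values : List (List (String × Option Int))) (out : List (String × Option Int)) : Decidable (Spec_derive_quarter_values base_values subtract_values out) := by unfold Spec_derive_quarter_values; infer_instance

-- ===== CLAIM (what is proved, stated in full; the proofs are below) =====
def Claim_equal_derive_quarter_values : Prop := ∀ (base_values : List (String × Option Int)) (subtract_values : List (List (String × Option Int))), Dom_derive_quarter_values base_values subtract_values → Spec_derive_quarter_values base_values subtract_values (derive_quarter_values base_values subtract_values)

-- ===== LEMMAS AND PROOFS =====

-- per-key effect of one subtract dict
def pvStep (sv : PySem.Dict String (Option Int)) (key : String) : Option Int → Option Int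
  | none => none
  | some b =>
    match sv.get? key with
    | some (some s) => some (b - s)
    | some none => none
    | none => some b

-- per-key effect of the whole subtract list
def pvF (key : String) (subs : List (PySem.Dict String (Option Int))) (v : Option Int) : Option Int :=
  subs.foldl (fun w sv => pvStep sv key w) v

lemma pvF_none (key : String) (subs : List (PySem.Dict String (Option Int))) :
    pvF key subs none = none := by
  induction subs with
  | nil => rfl
  | cons sv rest ih => simpa [pvF, pvStep] using ih

lemma pvF_cons (key : String) (sv : PySem.Dict String (Option Int))
    (rest : List (PySem.Dict String (Option Int))) (v : Option Int) :
    pvF key (sv :: rest) v = pvF key rest (pvStep sv key v) := rfl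

lemma pvLoopA_eq (key : String) (subs : List (PySem.Dict String (Option Int))) :
    ∀ b, pvLoopA key b subs = pvF key subs (some b) := by
  induction subs with
  | nil => intro b; rfl
  | cons sv rest ih =>
    intro b
    rw [pvF_cons]
    cases h : sv.get? key with
    | none =>
      have h1 : pvLoopA key b (sv :: rest) = pvLoopA key b rest := by simp [pvLoopA, h]
      have h2 : pvStep sv key (some b) = some b := by simp [pvStep, h]
      rw [h1, h2]; exact ih b
    | some w =>
      cases w with
      | none =>
        have h1 : pvLoopA key b (sv :: rest) = none := by simp [pvLoopA, h]
        have h2 : pvStep sv key (some b) = none := by simp [pvStep, h]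
        rw [h1, h2, pvF_none]
      | some s =>
        have h1 : pvLoopA key b (sv :: rest) = pvLoopA key (b - s) rest := by simp [pvLoopA, h]
        have h2 : pvStep sv key (some b) = some (b - s) := by simp [pvStep, h]
        rw [h1, h2]; exact ih (b - s)

-- one step of B's inner loop, seen per key
lemma pvInnerStep_facts (sv : PySem.Dict String (Option Int))
    (r : PySem.Dict String (Option Int)) (dead : PySem.Set String) (k0 : String)
    (h1 : r.contains k0 = true)
    (h2 : PySem.Set.contains dead k0 = true ↔ r.getD k0 none = none) :
    (pvInnerStep sv (r, dead) k0).1.keys = r.keys ∧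
    (pvInnerStep sv (r, dead) k0).1.getD k0 none = pvStep sv k0 (r.getD k0 none) ∧
    (PySem.Set.contains (pvInnerStep sv (r, dead) k0).2 k0 = true ↔
      (pvInnerStep sv (r, dead) k0).1.getD k0 none = none) ∧
    (∀ k, k ≠ k0 → (pvInnerStep sv (r, dead) k0).1.getD k none = r.getD k none ∧
      PySem.Set.contains (pvInnerStep sv (r, dead) k0).2 k = PySem.Set.contains dead k) := by
  by_cases hd : PySem.Set.contains dead k0 = true
  · have hmem : k0 ∈ dead := (PySem.Set.contains_iff dead k0).mp hd
    have hnone : r.getD k0 none = none := h2.mp hd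
    have hst : pvInnerStep sv (r, dead) k0 = (r, dead) := by
      simp [pvInnerStep, hmem]
    rw [hst]
    refine ⟨rfl, ?_, ?_, fun k _ => ⟨rfl, rfl⟩⟩
    · rw [hnone]; rfl
    · simp [hmem, hnone]
  · have hmem : k0 ∉ dead := fun h => hd ((PySem.Set.contains_iff dead k0).mpr h)
    have hne : r.getD k0 none ≠ none := fun h => hd (h2.mpr h)
    obtain ⟨b, hb⟩ := Option.ne_none_iff_exists'.mp hne
    cases hg : sv.get? k0 with
    | none =>
      have hst : pvInnerStep sv (r, dead) k0 = (r, dead) := by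
        simp [pvInnerStep, hmem, hg]
      rw [hst]
      refine ⟨rfl, ?_, ?_, fun k _ => ⟨rfl, rfl⟩⟩
      · rw [hb]; simp [pvStep, hg]
      · simp [hmem, hb]
    | some w =>
      cases w with
      | none =>
        have hst : pvInnerStep sv (r, dead) k0 = (r.insert k0 none, PySem.Set.add dead k0) := by
          simp [pvInnerStep, hmem, hg]
        rw [hst]
        refine ⟨PySem.Dict.keys_insert_of_contains r none h1, ?_, ?_, fun k hk => ⟨?_, ?_⟩⟩
        · rw [PySem.Dict.getD_insert_self, hb]; simp [pvStep, hg]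
        · rw [PySem.Dict.getD_insert_self]
          simp [PySem.Set.mem_add]
        · exact PySem.Dict.getD_insert_of_ne r none none hk
        · rw [Bool.eq_iff_iff, PySem.Set.contains_iff, PySem.Set.contains_iff,
            PySem.Set.mem_add]
          constructor
          · rintro (h | h)
            · exact h
            · exact absurd h hk
          · exact fun h => Or.inl h
      | some s =>
        have hst : pvInnerStep sv (r, dead) k0 =
            (r.insert k0 ((r.getD k0 none).map (· - s)), dead) := by
          simp [pvInnerStep, hmem, hg]
        rw [hst]
        refine ⟨PySem.Dict.keys_insert_of_contains r _ h1, ?_, ?_, fun k hk => ⟨?_, ?_⟩⟩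
        · rw [PySem.Dict.getD_insert_self, hb]; simp [pvStep, hg]
        · rw [PySem.Dict.getD_insert_self, hb]
          simp [hmem]
        · exact PySem.Dict.getD_insert_of_ne r _ _ hk
        · rfl

-- B's inner loop over a nodup key list, per-key characterisation
lemma pvInner_lemma (sv : PySem.Dict String (Option Int)) :
    ∀ (l : List String), l.Nodup →
    ∀ (r : PySem.Dict String (Option Int)) (dead : PySem.Set String),
    (∀ k ∈ l, r.contains k = true) →
    (∀ k ∈ l, (PySem.Set.contains dead k = true ↔ r.getD k none = none)) →
    (l.foldl (pvInnerStep sv) (r, dead)).1.keys = r.keys ∧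
    (∀ k ∈ l, (l.foldl (pvInnerStep sv) (r, dead)).1.getD k none = pvStep sv k (r.getD k none)) ∧
    (∀ k, k ∉ l → (l.foldl (pvInnerStep sv) (r, dead)).1.getD k none = r.getD k none ∧
        PySem.Set.contains (l.foldl (pvInnerStep sv) (r, dead)).2 k = PySem.Set.contains dead k) ∧
    (∀ k ∈ l, (PySem.Set.contains (l.foldl (pvInnerStep sv) (r, dead)).2 k = true ↔
        (l.foldl (pvInnerStep sv) (r, dead)).1.getD k none = none)) := by
  intro l
  induction l with
  | nil =>
    intro _ r dead _ _
    refine ⟨rfl, ?_, fun k _ => ⟨rfl, rfl⟩, ?_⟩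
    · intro k hk; exact absurd hk (List.not_mem_nil)
    · intro k hk; exact absurd hk (List.not_mem_nil)
  | cons k0 l ih =>
    intro hnd r dead h1 h2
    obtain ⟨hk0, hndl⟩ := List.nodup_cons.mp hnd
    obtain ⟨sA, sB, sBc, sC⟩ := pvInnerStep_facts sv r dead k0 (h1 k0 (List.mem_cons_self))
      (h2 k0 (List.mem_cons_self))
    have hfold : (k0 :: l).foldl (pvInnerStep sv) (r, dead) =
        l.foldl (pvInnerStep sv) (pvInnerStep sv (r, dead) k0) := rfl
    set st1 := pvInnerStep sv (r, dead) k0 with hst1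
    have hst1pair : st1 = (st1.1, st1.2) := rfl
    have h1' : ∀ k ∈ l, st1.1.contains k = true := by
      intro k hk
      have := h1 k (List.mem_cons_of_mem _ hk)
      rw [PySem.Dict.contains_iff_mem_keys] at this ⊢
      rw [sA]; exact this
    have h2' : ∀ k ∈ l, (PySem.Set.contains st1.2 k = true ↔ st1.1.getD k none = none) := by
      intro k hk
      have hkk0 : k ≠ k0 := fun h => hk0 (h ▸ hk)
      obtain ⟨hv, hc⟩ := sC k hkk0
      rw [hv, hc]
      exact h2 k (List.mem_cons_of_mem _ hk)
    have ihr := ih hndl st1.1 st1.2 h1' h2'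
    rw [← hst1pair] at ihr
    obtain ⟨iA, iB, iC, iD⟩ := ihr
    rw [hfold]
    refine ⟨iA.trans sA, ?_, ?_, ?_⟩
    · intro k hk
      rcases List.mem_cons.mp hk with hk | hk
      · subst hk
        have := (iC k hk0).1
        rw [this, sB]
      · have hkk0 : k ≠ k0 := fun h => hk0 (h ▸ hk)
        rw [iB k hk, (sC k hkk0).1]
    · intro k hk
      have hk1 : k ∉ l := fun h => hk (List.mem_cons_of_mem _ h)
      have hkk0 : k ≠ k0 := fun h => hk (h ▸ List.mem_cons_self)
      obtain ⟨iv, ic⟩ := iC k hk1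
      obtain ⟨v1, c1⟩ := sC k hkk0
      exact ⟨iv.trans v1, ic.trans c1⟩
    · intro k hk
      rcases List.mem_cons.mp hk with hk | hk
      · subst hk
        obtain ⟨iv, ic⟩ := iC k hk0
        rw [iv, ic]
        exact sBc
      · exact iD k hk

-- B's outer loop over the subtract dicts
lemma pvOuter_lemma :
    ∀ (svs : List (PySem.Dict String (Option Int))) (K : List String), K.Nodup →
    ∀ (r : PySem.Dict String (Option Int)) (dead : PySem.Set String),
    r.keys = K →
    (∀ k ∈ K, (PySem.Set.contains dead k = true ↔ r.getD k none = none)) →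
    (svs.foldl (fun st sv => K.foldl (pvInnerStep sv) st) (r, dead)).1.keys = K ∧
    (∀ k ∈ K, (svs.foldl (fun st sv => K.foldl (pvInnerStep sv) st) (r, dead)).1.getD k none =
        pvF k svs (r.getD k none)) := by
  intro svs
  induction svs with
  | nil =>
    intro K _ r dead hkeys _
    exact ⟨hkeys, fun k _ => rfl⟩
  | cons sv rest ih =>
    intro K hndK r dead hkeys h2
    have h1 : ∀ k ∈ K, r.contains k = true := by
      intro k hk
      rw [PySem.Dict.contains_iff_mem_keys, hkeys]; exact hk
    obtain ⟨sA, sB, _, sD⟩ := pvInner_lemma sv K hndK r dead h1 h2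
    have hfold : (sv :: rest).foldl (fun st sv => K.foldl (pvInnerStep sv) st) (r, dead) =
        rest.foldl (fun st sv => K.foldl (pvInnerStep sv) st) (K.foldl (pvInnerStep sv) (r, dead)) := rfl
    set st1 := K.foldl (pvInnerStep sv) (r, dead) with hst1
    have hst1pair : st1 = (st1.1, st1.2) := rfl
    have ihr := ih K hndK st1.1 st1.2 (sA.trans hkeys) sD
    rw [← hst1pair] at ihr
    obtain ⟨iA, iB⟩ := ihr
    rw [hfold]
    refine ⟨iA, ?_⟩
    intro k hk
    rw [iB k hk, sB k hk, pvF_cons]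

-- B's initial dead set, named for the proofs
def pvDead0 (base_values : List (String × Option Int)) : PySem.Set String :=
  PySem.Set.ofList ((PySem.Dict.ofList base_values).items.filterMap
    (fun kv => if kv.2 = none then some kv.1 else none))

-- B's initial dead set is coupled to the base dict
lemma pvDead0_coupling (base_values : List (String × Option Int)) :
    ∀ k ∈ (PySem.Dict.ofList base_values).keys,
      (PySem.Set.contains (pvDead0 base_values) k = true
        ↔ (PySem.Dict.ofList base_values).getD k none = none) := by
  intro k hk
  have hnd := PySem.Dict.nodup_keys_ofList (ν := Option Int) base_values
  rw [pvDead0, PySem.Set.contains_iff, PySem.Set.mem_ofList, List.mem_filterMap]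
  constructor
  · rintro ⟨kv, hkv, hf⟩
    by_cases h2 : kv.2 = none
    · rw [if_pos h2] at hf
      have hk1 : kv.1 = k := Option.some.inj hf
      have hv : (PySem.Dict.ofList base_values).getD kv.1 none = kv.2 :=
        PySem.Dict.getD_of_mem_items _ hkv hnd none
      rw [hk1] at hv
      rw [hv, h2]
    · rw [if_neg h2] at hf; cases hf
  · intro hnone
    simp only [PySem.Dict.keys] at hk
    obtain ⟨kv, hkv, hk1⟩ := List.mem_map.mp hk
    have hv : (PySem.Dict.ofList base_values).getD kv.1 none = kv.2 :=
      PySem.Dict.getD_of_mem_items _ hkv hnd none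
    have h2 : kv.2 = none := by rw [← hv, hk1, hnone]
    exact ⟨kv, hkv, by rw [if_pos h2, hk1]⟩

-- A's result, per key
lemma pvA_items (base_values : List (String × Option Int))
    (subtract_values : List (List (String × Option Int))) :
    derive_quarter_values base_values subtract_values =
      (PySem.Dict.ofList base_values).items.map
        (fun kv => (kv.1, pvF kv.1 (subtract_values.map PySem.Dict.ofList) kv.2)) := by
  have hA : derive_quarter_values base_values subtract_values =
      ((PySem.Dict.ofList base_values).items.foldl (fun result kv =>
        match kv.2 with
        | none => result.insert kv.1 none
        | some b => result.insert kv.1 (pvLoopA kv.1 b (subtract_values.map PySem.Dict.ofList)))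
        PySem.Dict.empty).items := rfl
  have hfun : (fun (result : PySem.Dict String (Option Int)) (kv : String × Option Int) =>
      match kv.2 with
      | none => result.insert kv.1 none
      | some b => result.insert kv.1 (pvLoopA kv.1 b (subtract_values.map PySem.Dict.ofList))) =
      (fun result kv => result.insert kv.1
        (pvF kv.1 (subtract_values.map PySem.Dict.ofList) kv.2)) := by
    funext result kv
    cases hkv : kv.2 with
    | none => simp [pvF_none]
    | some b => simp [pvLoopA_eq]
  rw [hA, hfun]
  rw [PySem.Dict.items_foldl_insert_fresh
      (l := (PySem.Dict.ofList base_values).items)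
      (k := fun kv : String × Option Int => kv.1)
      (v := fun kv : String × Option Int => pvF kv.1 (subtract_values.map PySem.Dict.ofList) kv.2)
      (d := PySem.Dict.empty)
      (fun a _ => PySem.Dict.contains_empty _)
      (by simpa [PySem.Dict.keys] using PySem.Dict.nodup_keys_ofList (ν := Option Int) base_values)]
  simp [PySem.Dict.empty]

theorem derive_quarter_values_spec : Claim_equal_derive_quarter_values := by
  intro base_values subtract_values _
  unfold Spec_derive_quarter_values
  have hnd : (PySem.Dict.ofList base_values).keys.Nodup :=
    PySem.Dict.nodup_keys_ofList base_values
  set st := (subtract_values.map PySem.Dict.ofList).foldl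
      (fun st sv => (PySem.Dict.ofList base_values).keys.foldl (pvInnerStep sv) st)
      (PySem.Dict.ofList base_values, pvDead0 base_values) with hst
  have hB : derive_quarter_values_alt base_values subtract_values = st.1.items := by
    rw [hst]
    have h1 : (subtract_values.map PySem.Dict.ofList).foldl
        (fun st sv => (PySem.Dict.ofList base_values).keys.foldl (pvInnerStep sv) st)
        (PySem.Dict.ofList base_values, pvDead0 base_values) =
        subtract_values.foldl
        (fun st sub_vals => (PySem.Dict.ofList base_values).keys.foldl
           (pvInnerStep (PySem.Dict.ofList sub_vals)) st)
        (PySem.Dict.ofList base_values, pvDead0 base_values) := List.foldl_map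
    rw [h1]; rfl
  obtain ⟨hK, hV⟩ := pvOuter_lemma (subtract_values.map PySem.Dict.ofList)
    (PySem.Dict.ofList base_values).keys hnd (PySem.Dict.ofList base_values)
    (pvDead0 base_values) rfl (pvDead0_coupling base_values)
  rw [← hst] at hK hV
  rw [pvA_items, hB, PySem.Dict.items_eq_map_keys st.1 (by rw [hK]; exact hnd) none, hK,
    PySem.Dict.items_eq_map_keys (PySem.Dict.ofList base_values) hnd none, List.map_map]
  refine List.map_congr_left ?_
  intro k hk
  simp only [Function.comp_apply]
  rw [hV k hk]
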